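-- pv_equiv track=rewrite | github.com/Zaplavs/Zaplavnij_animation | src/generator.py | _strip_trailing_non_code
-- ===== SOURCE A (Python) =====
-- def _strip_trailing_non_code(text):
--     lines = text.splitlines()
--     while lines and not lines[-1].strip():
--         lines.pop()
--
--     def is_code_line(line):
--         stripped = line.lstrip()
--         if not stripped:
--             return True
--         if line != stripped:
--             return True
--         if stripped.startswith("#"):
--             return True
--         for kw in (
--             "from ",
--             "import ",
--             "class ",
--             "def ",
--             "if ",
--             "elif ",
--             "else:",
--             "for ",
--             "while ",
--             "with ",
--             "try:",
--             "except ",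
--             "finally:",
--             "return ",
--             "pass",
--             "break",
--             "continue",
--             "raise ",
--             "@",
--         ):
--             if stripped.startswith(kw):
--                 return True
--         if any(tok in stripped for tok in ("=", "(", ")", "{", "}", "[", "]")):
--             return True
--         return False
--
--     while lines and not is_code_line(lines[-1]):
--         lines.pop()
--         while lines and not lines[-1].strip():
--             lines.pop()
--     return "\n".join(lines)
-- ===== SOURCE B (Python) =====
-- _KEYWORDS = (
--     "from ", "import ", "class ", "def ", "if ", "elif ", "else:",
--     "for ", "while ", "with ", "try:", "except ", "finally:",
--     "return ", "pass", "break", "continue", "raise ", "@",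
-- )
-- _TOKENS = ("=", "(", ")", "{", "}", "[", "]")
--
--
-- def _strip_trailing_non_code(text):
--     lines = text.splitlines()
--
--     def _is_prose(line):
--         stripped = line.lstrip()
--         return (
--             bool(stripped)
--             and line == stripped
--             and not stripped.startswith("#")
--             and not any(stripped.startswith(kw) for kw in _KEYWORDS)
--             and not any(tok in stripped for tok in _TOKENS)
--         )
--
--     cutoff = 0
--     for i, line in enumerate(lines):
--         if line.strip() and not _is_prose(line):
--             cutoff = i + 1
--     return "\n".join(lines[:cutoff])
-- ===== Notes on version B (the rewrite author's own statement) =====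
-- stated objective: alternative
-- what changed: Replaces the two interleaved destructive pop-from-the-end loops with a single forward pass that records the index after the last non-blank code line and returns the joined prefix slice; the keep/drop test is restated positively as an _is_prose conjunction instead of A's early-return is_code_line chain.
import Mathlib
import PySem

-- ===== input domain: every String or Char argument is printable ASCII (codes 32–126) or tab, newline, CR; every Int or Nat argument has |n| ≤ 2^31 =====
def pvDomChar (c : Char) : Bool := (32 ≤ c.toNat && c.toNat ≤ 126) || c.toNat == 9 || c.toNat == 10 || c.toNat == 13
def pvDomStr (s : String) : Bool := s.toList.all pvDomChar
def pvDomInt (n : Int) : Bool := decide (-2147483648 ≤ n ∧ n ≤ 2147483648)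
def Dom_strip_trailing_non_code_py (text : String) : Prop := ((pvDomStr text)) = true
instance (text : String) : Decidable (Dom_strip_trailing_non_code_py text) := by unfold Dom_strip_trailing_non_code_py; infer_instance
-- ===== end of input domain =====

-- B replaces A's two destructive pop-from-the-end loops by one forward pass recording the
-- index after the last non-blank code line, returning the joined prefix slice (alternative).

-- shared literal keyword/token tables (the same tuples appear in both Pythons)
def pvKeywords : List String :=
  ["from ", "import ", "class ", "def ", "if ", "elif ", "else:",
   "for ", "while ", "with ", "try:", "except ", "finally:",
   "return ", "pass", "break", "continue", "raise ", "@"]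
def pvTokens : List String := ["=", "(", ")", "{", "}", "[", "]"]

-- ===== PORT A =====
-- A's nested helper is_code_line: early-return if-chain
def pyIsCodeLine (line : String) : Bool :=
  let stripped := PySem.Str.lstrip line
  if stripped == "" then true
  else if line != stripped then true
  else if PySem.Str.startswith stripped "#" then true
  else if pvKeywords.any (fun kw => PySem.Str.startswith stripped kw) then true
  else if pvTokens.any (fun tok => PySem.Str.isIn tok stripped) then true
  else false

-- 'while lines and not lines[-1].strip(): lines.pop()'
def popBlanksA (lines : List String) : List String :=
  if h : lines = [] then lines
  else if PySem.Str.strip (lines.getLast h) == "" then popBlanksA lines.dropLast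
  else lines
termination_by lines.length
decreasing_by
  have := List.length_pos_of_ne_nil h
  simp only [List.length_dropLast]; omega

theorem popBlanksA_length_le (lines : List String) :
    (popBlanksA lines).length ≤ lines.length := by
  induction lines using popBlanksA.induct with
  | case1 => simp [popBlanksA]
  | case2 ls h hb ih =>
      rw [popBlanksA, dif_neg h, if_pos hb]
      refine le_trans ih ?_
      rw [List.length_dropLast]; omega
  | case3 ls h hb => rw [popBlanksA, dif_neg h, if_neg hb]

-- 'while lines and not is_code_line(lines[-1]): lines.pop(); <inner blank pop>'
def stripLoopA (lines : List String) : List String :=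
  if h : lines = [] then lines
  else if pyIsCodeLine (lines.getLast h) then lines
  else stripLoopA (popBlanksA lines.dropLast)
termination_by lines.length
decreasing_by
  have hp := List.length_pos_of_ne_nil h
  calc (popBlanksA lines.dropLast).length
      ≤ lines.dropLast.length := popBlanksA_length_le _
    _ < lines.length := by simp only [List.length_dropLast]; omega

def strip_trailing_non_code_py (text : String) : String :=
  PySem.Str.join "\n" (stripLoopA (popBlanksA (PySem.Str.splitlines text)))

-- ===== PORT B =====
-- B's helper _is_prose: one positive conjunction
def pyIsProse (line : String) : Bool :=
  let stripped := PySem.Str.lstrip line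
  !(stripped == "") &&
  (line == stripped) &&
  !(PySem.Str.startswith stripped "#") &&
  !(pvKeywords.any (fun kw => PySem.Str.startswith stripped kw)) &&
  !(pvTokens.any (fun tok => PySem.Str.isIn tok stripped))

-- forward pass: cutoff = i+1 at every non-blank non-prose line
def proseCutoff (lines : List String) : Int :=
  (PySem.List.enumerate lines).foldl
    (fun c p => if !(PySem.Str.strip p.2 == "") && !(pyIsProse p.2) then p.1 + 1 else c) 0

def strip_trailing_non_code_py_alt (text : String) : String :=
  PySem.Str.join "\n"
    (PySem.List.slice (PySem.Str.splitlines text) none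
      (some (proseCutoff (PySem.Str.splitlines text))))

-- ===== PRECONDITION & SPEC =====
def Spec_strip_trailing_non_code_py (text : String) (out : String) : Prop := out = strip_trailing_non_code_py_alt text
instance (text : String) (out : String) : Decidable (Spec_strip_trailing_non_code_py text out) := by unfold Spec_strip_trailing_non_code_py; infer_instance

-- ===== CLAIM (what is proved, stated in full; the proofs are below) =====
def Claim_equal_strip_trailing_non_code_py : Prop := ∀ (text : String), Dom_strip_trailing_non_code_py text → Spec_strip_trailing_non_code_py text (strip_trailing_non_code_py text)

-- ===== LEMMAS AND PROOFS =====

-- B's prose test is exactly the negation of A's is_code_line test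
theorem prose_eq_not_code (l : String) : pyIsProse l = !pyIsCodeLine l := by
  unfold pyIsProse pyIsCodeLine
  simp only [bne, Bool.if_true_left]
  cases (PySem.Str.lstrip l == "") <;>
  cases (l == PySem.Str.lstrip l) <;>
  cases (PySem.Str.startswith (PySem.Str.lstrip l) "#") <;>
  cases (pvKeywords.any (fun kw => PySem.Str.startswith (PySem.Str.lstrip l) kw)) <;>
  cases (pvTokens.any (fun tok => PySem.Str.isIn tok (PySem.Str.lstrip l))) <;> rfl

-- "keep" condition: non-blank and a code line
def pvGood (l : String) : Bool := !(PySem.Str.strip l == "") && pyIsCodeLine l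

theorem popBlanksA_append (ls : List String) (a : String) :
    popBlanksA (ls ++ [a]) =
      if PySem.Str.strip a == "" then popBlanksA ls else ls ++ [a] := by
  rw [popBlanksA, dif_neg (by simp), List.getLast_concat, List.dropLast_concat]

theorem stripLoopA_popBlanks_append (ls : List String) (a : String) :
    stripLoopA (popBlanksA (ls ++ [a])) =
      if pvGood a then ls ++ [a] else stripLoopA (popBlanksA ls) := by
  rw [popBlanksA_append]
  by_cases hb : PySem.Str.strip a == ""
  · simp [hb, pvGood]
  · rw [if_neg hb, stripLoopA, dif_neg (show ls ++ [a] ≠ [] by simp),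
        List.getLast_concat, List.dropLast_concat]
    by_cases hc : pyIsCodeLine a <;> simp [pvGood, hb, hc]

theorem proseCutoff_append (ls : List String) (a : String) :
    proseCutoff (ls ++ [a]) =
      if pvGood a then (ls.length : Int) + 1 else proseCutoff ls := by
  unfold proseCutoff
  rw [PySem.List.enumerate_append, List.foldl_append]
  simp only [PySem.List.enumerate_cons, PySem.List.enumerate_nil, List.foldl_cons, List.foldl_nil]
  rw [prose_eq_not_code]
  by_cases hb : PySem.Str.strip a == "" <;>
    by_cases hc : pyIsCodeLine a <;>
      simp [pvGood, hb, hc]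

theorem main_eq (ls : List String) :
    stripLoopA (popBlanksA ls) = ls.take (proseCutoff ls).toNat ∧
      0 ≤ proseCutoff ls ∧ proseCutoff ls ≤ (ls.length : Int) := by
  induction ls using List.reverseRecOn with
  | nil =>
      refine ⟨?_, by simp [proseCutoff], by simp [proseCutoff]⟩
      rw [popBlanksA, stripLoopA]
      simp [proseCutoff]
  | append_singleton ls a ih =>
      obtain ⟨heq, h0, hle⟩ := ih
      rw [stripLoopA_popBlanks_append, proseCutoff_append]
      by_cases hg : pvGood a
      · refine ⟨?_, by rw [if_pos hg]; positivity, by simp [hg]⟩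
        rw [if_pos hg, if_pos hg]
        have : ((ls.length : Int) + 1).toNat = ls.length + 1 := by omega
        rw [this, List.take_of_length_le (by simp)]
      · refine ⟨?_, by simp [hg, h0], ?_⟩
        · rw [if_neg hg, if_neg hg, heq,
              List.take_append_of_le_length (by omega)]
        · rw [if_neg hg]
          simp only [List.length_append, List.length_singleton]
          push_cast
          omega

-- ===== VERDICT (by name: the statement is the Claim_ definition above) =====
theorem strip_trailing_non_code_py_spec : Claim_equal_strip_trailing_non_code_py := by
  intro text _
  unfold Spec_strip_trailing_non_code_py strip_trailing_non_code_py strip_trailing_non_code_py_alt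
  obtain ⟨heq, h0, _⟩ := main_eq (PySem.Str.splitlines text)
  have hs : PySem.List.slice (PySem.Str.splitlines text) none
      (some (proseCutoff (PySem.Str.splitlines text))) =
      (PySem.Str.splitlines text).take (proseCutoff (PySem.Str.splitlines text)).toNat := by
    rw [← Int.toNat_of_nonneg h0, PySem.List.slice_to_natCast, Int.toNat_of_nonneg h0]
  rw [hs, heq]
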